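-- pv_equiv track=rewrite | github.com/dpflann/OER | udacity/design_of_computer_programs/final/unit-1_bowling.py | bowling_two
-- ===== SOURCE A (Python) =====
-- def bowling_two(balls, frame=1):
--     """Compute the total score for a player's game of bowling_two.
--     """
--
--     if len(balls) <= 2 or frame == 10:
--         return sum(balls)
--     elif balls[0] == 10:
--         return balls[0] + balls[1] + balls[2] + bowling_two(balls[1:], frame+1)  # strike
--     elif balls[0] + balls[1] == 10:
--         return balls[0] + balls[1] + balls[2] + bowling_two(balls[2:], frame+1)  # spare
--     else:
--         return balls[0] + balls[1] + bowling_two(balls[2:], frame+1)  # open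
-- ===== SOURCE B (Python) =====
-- def bowling_two(balls, frame=1):
--     """Compute the total score for a player's game of bowling_two."""
--     total = 0
--     i = 0
--     f = frame
--     n = len(balls)
--     while n - i > 2 and f != 10:
--         a, b = balls[i], balls[i + 1]
--         if a == 10:
--             total += a + b + balls[i + 2]
--             i += 1
--         elif a + b == 10:
--             total += a + b + balls[i + 2]
--             i += 2
--         else:
--             total += a + b
--             i += 2
--         f += 1
--     return total + sum(balls[i:])
-- ===== Notes on version B (the rewrite author's own statement) =====
-- stated objective: faster
-- what changed: Replaced A's recursion that slices the list on every frame with a single while-loop over an index pointer and a running total, so no list copies are made.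
import Mathlib
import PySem

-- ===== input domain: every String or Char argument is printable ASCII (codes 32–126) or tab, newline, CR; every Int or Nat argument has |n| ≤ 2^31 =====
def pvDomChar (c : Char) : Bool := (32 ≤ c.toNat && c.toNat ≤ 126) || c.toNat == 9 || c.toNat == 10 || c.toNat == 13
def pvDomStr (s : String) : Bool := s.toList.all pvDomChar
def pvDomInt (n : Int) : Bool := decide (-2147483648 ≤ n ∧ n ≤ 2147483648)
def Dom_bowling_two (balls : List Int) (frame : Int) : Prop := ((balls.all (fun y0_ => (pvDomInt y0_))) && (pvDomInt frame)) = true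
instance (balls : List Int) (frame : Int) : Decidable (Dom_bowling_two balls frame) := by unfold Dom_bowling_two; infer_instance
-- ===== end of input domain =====

-- B replaces A's slice-per-call recursion with a single index-pointer loop (same results, no list copies).


-- ===== PORT A =====
-- Literal port of A: 'len(balls) <= 2' is the short-list fallback of the match;
-- in the ≥3-element case balls[0], balls[1], balls[2] are the pattern variables a, b, c.
def bowling_two (balls : List Int) (frame : Int) : Int :=
  match balls with
  | a :: b :: c :: rest =>
    if frame = 10 then (a :: b :: c :: rest).sum
    else if a = 10 then a + b + c + bowling_two (b :: c :: rest) (frame + 1)      -- strike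
    else if a + b = 10 then a + b + c + bowling_two (c :: rest) (frame + 1)       -- spare
    else a + b + bowling_two (c :: rest) (frame + 1)                              -- open
  | short => short.sum

-- ===== PORT B =====
-- B's while-loop: index pointer i, frame counter f, running total.
def bowlingLoop (balls : List Int) (i : Nat) (f : Int) (total : Int) : Int :=
  if _h : balls.length - i > 2 ∧ f ≠ 10 then
    let a := balls.getD i 0
    let b := balls.getD (i + 1) 0
    if a = 10 then
      bowlingLoop balls (i + 1) (f + 1) (total + a + b + balls.getD (i + 2) 0)
    else if a + b = 10 then
      bowlingLoop balls (i + 2) (f + 1) (total + a + b + balls.getD (i + 2) 0)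
    else
      bowlingLoop balls (i + 2) (f + 1) (total + a + b)
  else total + (balls.drop i).sum
termination_by balls.length - i
decreasing_by all_goals omega

def bowling_two_alt (balls : List Int) (frame : Int) : Int :=
  bowlingLoop balls 0 frame 0

-- ===== PRECONDITION & SPEC =====
def Spec_bowling_two (balls : List Int) (frame : Int) (out : Int) : Prop := out = bowling_two_alt balls frame
instance (balls : List Int) (frame : Int) (out : Int) : Decidable (Spec_bowling_two balls frame out) := by unfold Spec_bowling_two; infer_instance

-- ===== CLAIM (what is proved, stated in full; the proofs are below) =====
def Claim_equal_bowling_two : Prop := ∀ (balls : List Int) (frame : Int), Dom_bowling_two balls frame → Spec_bowling_two balls frame (bowling_two balls frame)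

-- ===== LEMMAS AND PROOFS =====

theorem drop_eq_getD_cons (balls : List Int) (i : Nat) (h : i < balls.length) :
    balls.drop i = balls.getD i 0 :: balls.drop (i + 1) := by
  rw [List.drop_eq_getElem_cons h, List.getD, List.getElem?_eq_getElem h]
  rfl

-- Loop invariant: from index i the loop computes total + A's score of the suffix.
theorem bowlingLoop_eq (balls : List Int) (i : Nat) (f : Int) (total : Int) :
    bowlingLoop balls i f total = total + bowling_two (balls.drop i) f := by
  induction i, f, total using bowlingLoop.induct balls with
  | case1 i f total h a b ha ih =>
    obtain ⟨hlen, hf⟩ := h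
    have h0 : balls.drop i = balls.getD i 0 :: balls.drop (i + 1) :=
      drop_eq_getD_cons balls i (by omega)
    have h1 : balls.drop (i + 1) = balls.getD (i + 1) 0 :: balls.drop (i + 2) :=
      drop_eq_getD_cons balls (i + 1) (by omega)
    have h2 : balls.drop (i + 2) = balls.getD (i + 2) 0 :: balls.drop (i + 3) :=
      drop_eq_getD_cons balls (i + 2) (by omega)
    rw [bowlingLoop]
    simp only [dif_pos (And.intro hlen hf)]
    rw [if_pos ha, ih, h0, h1, h2, bowling_two]
    rw [if_neg hf, if_pos ha, ← h2, ← h1]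
    ring
  | case2 i f total h a b ha hab ih =>
    obtain ⟨hlen, hf⟩ := h
    have h0 : balls.drop i = balls.getD i 0 :: balls.drop (i + 1) :=
      drop_eq_getD_cons balls i (by omega)
    have h1 : balls.drop (i + 1) = balls.getD (i + 1) 0 :: balls.drop (i + 2) :=
      drop_eq_getD_cons balls (i + 1) (by omega)
    have h2 : balls.drop (i + 2) = balls.getD (i + 2) 0 :: balls.drop (i + 3) :=
      drop_eq_getD_cons balls (i + 2) (by omega)
    rw [bowlingLoop]
    simp only [dif_pos (And.intro hlen hf)]
    rw [if_neg ha, if_pos hab, ih, h0, h1, h2, bowling_two]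
    rw [if_neg hf, if_neg ha, if_pos hab, ← h2]
    ring
  | case3 i f total h a b ha hab ih =>
    obtain ⟨hlen, hf⟩ := h
    have h0 : balls.drop i = balls.getD i 0 :: balls.drop (i + 1) :=
      drop_eq_getD_cons balls i (by omega)
    have h1 : balls.drop (i + 1) = balls.getD (i + 1) 0 :: balls.drop (i + 2) :=
      drop_eq_getD_cons balls (i + 1) (by omega)
    have h2 : balls.drop (i + 2) = balls.getD (i + 2) 0 :: balls.drop (i + 3) :=
      drop_eq_getD_cons balls (i + 2) (by omega)
    rw [bowlingLoop]
    simp only [dif_pos (And.intro hlen hf)]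
    rw [if_neg ha, if_neg hab, ih, h0, h1, h2, bowling_two]
    rw [if_neg hf, if_neg ha, if_neg hab, ← h2]
    ring
  | case4 i f total h =>
    rw [bowlingLoop]
    simp only [dif_neg h]
    rcases hd : balls.drop i with _ | ⟨x, _ | ⟨y, _ | ⟨z, rest⟩⟩⟩
    · simp [bowling_two]
    · simp [bowling_two]
    · simp [bowling_two]
    · by_cases hf : f = 10
      · simp [bowling_two, hf]
      · exfalso
        have hlen : ¬ balls.length - i > 2 := fun hg => h ⟨hg, hf⟩
        have hl3 := congrArg List.length hd
        simp at hl3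
        omega

-- ===== VERDICT (by name: the statement is the Claim_ definition above) =====
theorem bowling_two_spec : Claim_equal_bowling_two := by
  intro balls frame _
  unfold Spec_bowling_two bowling_two_alt
  rw [bowlingLoop_eq]
  simp
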